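-- pv_equiv track=rewrite | github.com/sun-hainan/Python | 可验证计算/polynomial_commitment.py | interpolate_at_point
-- ===== SOURCE A (Python) =====
-- def interpolate_at_point(points, x, modulus=17):
--     """
--     拉格朗日插值：在给定 x 处通过点集插值求值。
--
--     参数:
--         points: [(x_i, y_i), ...]
--         x: 目标点
--         modulus: 模数
--
--     返回:
--         插值结果 f(x)
--     """
--     result = 0
--     for i, (xi, yi) in enumerate(points):
--         # 计算拉格朗日基多项式 L_i(x)
--         numerator = 1
--         denominator = 1
--         for j, (xj, _) in enumerate(points):
--             if i != j:
--                 numerator = (numerator * (x - xj)) % modulus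
--                 denominator = (denominator * (xi - xj)) % modulus
--         # 模逆
--         inv_denom = pow(denominator, -1, modulus)
--         Li = (numerator * inv_denom) % modulus
--         result = (result + yi * Li) % modulus
--     return result
-- ===== SOURCE B (Python) =====
-- def interpolate_at_point(points, x, modulus=17):
--     """Lagrange interpolation at x mod modulus, with front-loaded prefix/suffix
--     numerator tables instead of rescanning the points for every basis polynomial."""
--     n = len(points)
--     if n == 0:
--         return 0
--     # pre[i] = prod_{j<i} (x - xj) mod modulus ; suf[i] = prod_{j>=i} (x - xj) mod modulus
--     pre = [1] * (n + 1)
--     for i in range(n):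
--         pre[i + 1] = (pre[i] * (x - points[i][0])) % modulus
--     suf = [1] * (n + 1)
--     for i in range(n - 1, -1, -1):
--         suf[i] = (suf[i + 1] * (x - points[i][0])) % modulus
--     result = 0
--     for i, (xi, yi) in enumerate(points):
--         denominator = 1
--         for j, (xj, _) in enumerate(points):
--             if j != i:
--                 denominator = (denominator * (xi - xj)) % modulus
--         numerator = (pre[i] * suf[i + 1]) % modulus
--         inv = pow(denominator, -1, modulus)
--         result = (result + yi * numerator * inv) % modulus
--     return result
-- ===== Notes on version B (the rewrite author's own statement) =====
-- stated objective: alternative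
-- what changed: A rescans all points inside every outer iteration to build each basis numerator; B front-loads two linear passes building prefix and suffix product tables of (x - xj) mod m and reads each numerator off the tables, so the quadratic part keeps only the denominator scan.
import Mathlib
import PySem

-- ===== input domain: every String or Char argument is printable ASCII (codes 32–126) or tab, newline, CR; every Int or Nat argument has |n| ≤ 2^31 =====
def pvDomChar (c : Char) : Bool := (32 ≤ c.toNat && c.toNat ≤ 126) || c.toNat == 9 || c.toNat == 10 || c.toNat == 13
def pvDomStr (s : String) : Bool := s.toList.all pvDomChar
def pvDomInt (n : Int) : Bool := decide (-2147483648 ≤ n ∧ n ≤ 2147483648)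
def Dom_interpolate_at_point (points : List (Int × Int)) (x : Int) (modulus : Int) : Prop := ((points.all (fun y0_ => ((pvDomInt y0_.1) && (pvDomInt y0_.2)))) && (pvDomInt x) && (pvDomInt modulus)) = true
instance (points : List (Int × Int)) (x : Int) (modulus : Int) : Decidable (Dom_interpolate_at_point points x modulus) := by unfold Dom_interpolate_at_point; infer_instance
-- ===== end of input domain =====

-- B replaces A's per-basis rescanning of the points for the numerator by two
-- front-loaded prefix/suffix product tables read back during the main loop.

-- ===== PORT A =====
-- shared helper: Python's pow(d, -1, m). Exact whenever gcd(d, m) = 1 and m ≠ 0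
-- (Pre_ guarantees that); Python raises ValueError otherwise.
def pyInvMod (d m : Int) : Int := PySem.Int.mod (Int.gcdA d m) m

def interpolate_at_point (points : List (Int × Int)) (x : Int) (modulus : Int) : Int :=
  (PySem.List.enumerate points 0).foldl
    (fun result ip =>
      let i := ip.1; let xi := ip.2.1; let yi := ip.2.2
      -- numerator, denominator accumulated together over the inner enumerate
      let nd := (PySem.List.enumerate points 0).foldl
        (fun nd jp =>
          if i ≠ jp.1 then
            (PySem.Int.mod (nd.1 * (x - jp.2.1)) modulus,
             PySem.Int.mod (nd.2 * (xi - jp.2.1)) modulus)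
          else nd) ((1 : Int), (1 : Int))
      let inv_denom := pyInvMod nd.2 modulus
      let Li := PySem.Int.mod (nd.1 * inv_denom) modulus
      PySem.Int.mod (result + yi * Li) modulus) 0

-- ===== PORT B =====
-- pre table: pre[0]=acc, pre[k+1] = (pre[k]*(x - x_k)) % m  (Source B's first loop)
def preTable (x m : Int) : List (Int × Int) → Int → List Int
  | [], acc => [acc]
  | p :: rest, acc => acc :: preTable x m rest (PySem.Int.mod (acc * (x - p.1)) m)

-- suf table: suf[n]=1, suf[k] = (suf[k+1]*(x - x_k)) % m, built right-to-left (Source B's second loop)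
def sufTable (x m : Int) : List (Int × Int) → List Int
  | [] => [1]
  | p :: rest =>
    let s := sufTable x m rest
    PySem.Int.mod (s.headI * (x - p.1)) m :: s

def interpolate_at_point_alt (points : List (Int × Int)) (x : Int) (modulus : Int) : Int :=
  if points.length = 0 then 0
  else
    let pre := preTable x modulus points 1
    let suf := sufTable x modulus points
    (PySem.List.enumerate points 0).foldl
      (fun result ip =>
        let i := ip.1; let xi := ip.2.1; let yi := ip.2.2
        let denominator := (PySem.List.enumerate points 0).foldl
          (fun den jp =>
            if jp.1 ≠ i then PySem.Int.mod (den * (xi - jp.2.1)) modulus else den) 1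
        let numerator := PySem.Int.mod (PySem.List.pyGetD pre i 0 * PySem.List.pyGetD suf (i + 1) 0) modulus
        let inv := pyInvMod denominator modulus
        PySem.Int.mod (result + yi * numerator * inv) modulus) 0

-- ===== PRECONDITION & SPEC =====
-- Pre_ excludes exactly the inputs where A raises: modulus = 0 with points nonempty
-- (ZeroDivisionError / ValueError), and any pair of points whose x-difference is not
-- coprime to modulus (pow(denominator, -1, modulus) raises ValueError).
def Pre_interpolate_at_point (points : List (Int × Int)) (x : Int) (modulus : Int) : Prop :=
  (points = [] ∨ modulus ≠ 0) ∧
  points.Pairwise (fun p q => Int.gcd (p.1 - q.1) modulus = 1)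

instance (points : List (Int × Int)) (x : Int) (modulus : Int) : Decidable (Pre_interpolate_at_point points x modulus) := by
  unfold Pre_interpolate_at_point; infer_instance

def pvWitness_interpolate_at_point : (List (Int × Int)) × Int × Int := ([(0, 1), (1, 3), (2, 2)], 5, 7)

def Spec_interpolate_at_point (points : List (Int × Int)) (x : Int) (modulus : Int) (out : Int) : Prop := out = interpolate_at_point_alt points x modulus
instance (points : List (Int × Int)) (x : Int) (modulus : Int) (out : Int) : Decidable (Spec_interpolate_at_point points x modulus out) := by unfold Spec_interpolate_at_point; infer_instance

-- ===== CLAIM (what is proved, stated in full; the proofs are below) =====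
def Claim_equal_interpolate_at_point : Prop := ∀ (points : List (Int × Int)) (x : Int) (modulus : Int), Dom_interpolate_at_point points x modulus → Pre_interpolate_at_point points x modulus → Spec_interpolate_at_point points x modulus (interpolate_at_point points x modulus)

-- ===== LEMMAS AND PROOFS =====

-- Python's % (floor mod) maps congruent numbers to the same representative.
theorem pymod_modeq (a m : Int) : Int.ModEq m (PySem.Int.mod a m) a := by
  have h := PySem.Int.floordiv_mul_add_mod a m
  refine (Int.modEq_iff_dvd.mpr ?_)
  exact ⟨PySem.Int.floordiv a m, by linarith⟩

theorem pymod_congr {a b : Int} (m : Int) (h : Int.ModEq m a b) :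
    PySem.Int.mod a m = PySem.Int.mod b m := by
  rcases lt_trichotomy m 0 with hm | hm | hm
  · have hdvd : m ∣ PySem.Int.mod a m - PySem.Int.mod b m := by
      have := ((pymod_modeq a m).trans h).trans (pymod_modeq b m).symm
      exact (Int.ModEq.dvd this.symm)
    have h1 := PySem.Int.mod_neg_bounds a hm
    have h2 := PySem.Int.mod_neg_bounds b hm
    have := Int.eq_zero_of_dvd_of_natAbs_lt_natAbs hdvd (by omega)
    omega
  · subst hm
    have := h.sub_right b
    simp [Int.ModEq] at h
    simp [h]
  · have hdvd : m ∣ PySem.Int.mod a m - PySem.Int.mod b m := by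
      have := ((pymod_modeq a m).trans h).trans (pymod_modeq b m).symm
      exact (Int.ModEq.dvd this.symm)
    have h1a := PySem.Int.mod_nonneg a hm
    have h1b := PySem.Int.mod_lt a hm
    have h2a := PySem.Int.mod_nonneg b hm
    have h2b := PySem.Int.mod_lt b hm
    have := Int.eq_zero_of_dvd_of_natAbs_lt_natAbs hdvd (by omega)
    omega

-- A's paired (numerator, denominator) fold splits into two independent scalar folds.
theorem foldl_pair_split (x m i xi : Int) (l : List (Int × (Int × Int))) (n0 d0 : Int) :
    l.foldl
      (fun nd jp =>
        if i ≠ jp.1 then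
          (PySem.Int.mod (nd.1 * (x - jp.2.1)) m, PySem.Int.mod (nd.2 * (xi - jp.2.1)) m)
        else nd) (n0, d0)
    = (l.foldl (fun a jp => if i ≠ jp.1 then PySem.Int.mod (a * (x - jp.2.1)) m else a) n0,
       l.foldl (fun a jp => if i ≠ jp.1 then PySem.Int.mod (a * (xi - jp.2.1)) m else a) d0) := by
  induction l generalizing n0 d0 with
  | nil => rfl
  | cons h t ih =>
    by_cases hc : i ≠ h.1
    · simp only [List.foldl_cons, if_pos hc]; exact ih _ _
    · simp only [List.foldl_cons, if_neg hc]; exact ih _ _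

-- A guarded multiply-and-reduce fold is congruent to the filtered product.
theorem foldl_modmul_modeq (m : Int) {α : Type} (p : α → Prop) [DecidablePred p]
    (f : α → Int) (l : List α) (a0 : Int) :
    Int.ModEq m
      (l.foldl (fun a c => if p c then PySem.Int.mod (a * f c) m else a) a0)
      (a0 * ((l.filter (fun c => decide (p c))).map f).prod) := by
  induction l generalizing a0 with
  | nil => simp
  | cons h t ih =>
    by_cases hc : p h
    · simp only [List.foldl_cons, List.filter_cons, hc, if_pos, decide_true, List.map_cons,
        List.prod_cons]
      refine (ih _).trans ?_
      have : Int.ModEq m (PySem.Int.mod (a0 * f h) m) (a0 * f h) := pymod_modeq _ m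
      calc PySem.Int.mod (a0 * f h) m * ((t.filter (fun c => decide (p c))).map f).prod
          ≡ (a0 * f h) * ((t.filter (fun c => decide (p c))).map f).prod [ZMOD m] :=
            this.mul_right _
        _ = a0 * (f h * ((t.filter (fun c => decide (p c))).map f).prod) := by ring
    · simp only [List.foldl_cons, List.filter_cons, hc, if_neg, decide_false]
      simpa [hc] using ih a0

theorem map_enum_snd (x : Int) (xs : List (Int × Int)) (s : Int) :
    (PySem.List.enumerate xs s).map (fun jp => x - jp.2.1) = xs.map (fun p => x - p.1) := by
  have h := PySem.List.map_snd_enumerate xs s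
  calc (PySem.List.enumerate xs s).map (fun jp => x - jp.2.1)
      = ((PySem.List.enumerate xs s).map (fun p => p.2)).map (fun p => x - p.1) := by
        rw [List.map_map]; rfl
    _ = xs.map (fun p => x - p.1) := by rw [h]

-- the filtered (index ≠ i) product over the enumeration = take-product * drop-product
theorem prod_enum_ne (x : Int) (points : List (Int × Int)) (i : Nat) (hi : i < points.length) :
    (((PySem.List.enumerate points 0).filter
        (fun jp => decide ((i : Int) ≠ jp.1))).map (fun jp => x - jp.2.1)).prod
    = (((points.take i).map (fun p => x - p.1)).prod *
       ((points.drop (i + 1)).map (fun p => x - p.1)).prod) := by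
  have hlen : (points.take i).length = i := by simp [List.length_take, hi.le]
  have hsplit : points = points.take i ++ points[i] :: points.drop (i + 1) := by
    conv_lhs => rw [← List.take_append_drop i points]
    rw [List.drop_eq_getElem_cons hi]
  conv_lhs => rw [hsplit]
  rw [PySem.List.enumerate_append, PySem.List.enumerate_cons, List.filter_append,
    List.filter_cons, hlen]
  have hmid : ¬((i : Int) ≠ 0 + (i : Nat)) := by omega
  have h1 : ((PySem.List.enumerate (points.take i) 0).filter
      (fun jp => decide ((i : Int) ≠ jp.1))) = PySem.List.enumerate (points.take i) 0 := by
    refine List.filter_eq_self.mpr ?_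
    intro a ha
    rcases (PySem.List.mem_enumerate_iff _ _ _).1 ha with ⟨k, hk, rfl⟩
    rw [hlen] at hk
    simp only [decide_eq_true_eq]
    omega
  have h2 : ((PySem.List.enumerate (points.drop (i + 1)) (0 + (i : Nat) + 1)).filter
      (fun jp => decide ((i : Int) ≠ jp.1))) = PySem.List.enumerate (points.drop (i + 1)) (0 + (i : Nat) + 1) := by
    refine List.filter_eq_self.mpr ?_
    intro a ha
    rcases (PySem.List.mem_enumerate_iff _ _ _).1 ha with ⟨k, hk, rfl⟩
    simp only [decide_eq_true_eq]
    omega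
  simp only [hmid, decide_false, if_neg, h1, h2, List.map_append, List.prod_append,
    map_enum_snd, Bool.false_eq_true]
  simp [map_enum_snd]

-- pre-table entries are congruent to prefix products
theorem preTable_getD (x m : Int) (points : List (Int × Int)) (acc : Int) (i : Nat)
    (hi : i ≤ points.length) :
    Int.ModEq m ((preTable x m points acc).getD i 0)
      (acc * ((points.take i).map (fun p => x - p.1)).prod) := by
  induction points generalizing acc i with
  | nil =>
    have h0 : i = 0 := by simpa using hi
    subst h0; simp [preTable]
  | cons h t ih =>
    cases i with
    | zero => simp [preTable]
    | succ k =>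
      simp only [preTable, List.getD_cons_succ, List.take_succ_cons, List.map_cons,
        List.prod_cons]
      refine (ih _ k (by simpa using hi)).trans ?_
      calc PySem.Int.mod (acc * (x - h.1)) m * ((t.take k).map (fun p => x - p.1)).prod
          ≡ (acc * (x - h.1)) * ((t.take k).map (fun p => x - p.1)).prod [ZMOD m] :=
            (pymod_modeq _ m).mul_right _
        _ = acc * ((x - h.1) * ((t.take k).map (fun p => x - p.1)).prod) := by ring

theorem sufTable_ne_nil (x m : Int) (points : List (Int × Int)) : sufTable x m points ≠ [] := by
  cases points <;> simp [sufTable]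

-- suf-table entries are congruent to suffix products
theorem sufTable_getD (x m : Int) (points : List (Int × Int)) (i : Nat)
    (hi : i ≤ points.length) :
    Int.ModEq m ((sufTable x m points).getD i 0)
      (((points.drop i).map (fun p => x - p.1)).prod) := by
  induction points generalizing i with
  | nil =>
    have h0 : i = 0 := by simpa using hi
    subst h0; simp [sufTable]
  | cons h t ih =>
    cases i with
    | zero =>
      simp only [sufTable, List.getD_cons_zero, List.drop_zero, List.map_cons, List.prod_cons]
      have hhead : (sufTable x m t).headI = (sufTable x m t).getD 0 0 := by
        cases hs : sufTable x m t with
        | nil => exact absurd hs (sufTable_ne_nil x m t)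
        | cons a s => simp
      rw [hhead]
      refine (pymod_modeq _ m).trans ?_
      calc (sufTable x m t).getD 0 0 * (x - h.1)
          ≡ ((t.drop 0).map (fun p => x - p.1)).prod * (x - h.1) [ZMOD m] :=
            (ih 0 (Nat.zero_le _)).mul_right _
        _ = (x - h.1) * (t.map (fun p => x - p.1)).prod := by simp [mul_comm]
    | succ k =>
      simp only [sufTable, List.getD_cons_succ, List.drop_succ_cons]
      exact ih k (by simpa using hi)

-- the two denominator folds are the same computation (i ≠ j vs j ≠ i)
theorem den_fold_comm (m xi i : Int) (l : List (Int × (Int × Int))) (d0 : Int) :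
    l.foldl (fun a jp => if i ≠ jp.1 then PySem.Int.mod (a * (xi - jp.2.1)) m else a) d0
    = l.foldl (fun a jp => if jp.1 ≠ i then PySem.Int.mod (a * (xi - jp.2.1)) m else a) d0 := by
  refine PySem.List.foldl_congr_mem l _ _ d0 ?_
  intro acc jp _
  by_cases hc : i = jp.1 <;> simp [hc, Ne, eq_comm]

theorem interpolate_steps_eq (points : List (Int × Int)) (x modulus : Int) (r : Int)
    (ip : Int × (Int × Int)) (hip : ip ∈ PySem.List.enumerate points 0) :
    (fun result ip =>
      let i := ip.1; let xi := ip.2.1; let yi := ip.2.2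
      let nd := (PySem.List.enumerate points 0).foldl
        (fun nd jp =>
          if i ≠ jp.1 then
            (PySem.Int.mod (nd.1 * (x - jp.2.1)) modulus,
             PySem.Int.mod (nd.2 * (xi - jp.2.1)) modulus)
          else nd) ((1 : Int), (1 : Int))
      let inv_denom := pyInvMod nd.2 modulus
      let Li := PySem.Int.mod (nd.1 * inv_denom) modulus
      PySem.Int.mod (r + yi * Li) modulus)
      r ip
    = (fun result ip =>
        let i := ip.1; let xi := ip.2.1; let yi := ip.2.2
        let denominator := (PySem.List.enumerate points 0).foldl
          (fun den jp =>
            if jp.1 ≠ i then PySem.Int.mod (den * (xi - jp.2.1)) modulus else den) 1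
        let numerator := PySem.Int.mod
          (PySem.List.pyGetD (preTable x modulus points 1) i 0 *
           PySem.List.pyGetD (sufTable x modulus points) (i + 1) 0) modulus
        let inv := pyInvMod denominator modulus
        PySem.Int.mod (r + yi * numerator * inv) modulus)
        r ip := by
  rcases (PySem.List.mem_enumerate_iff points 0 ip).1 hip with ⟨k, hk, rfl⟩
  simp only [zero_add, foldl_pair_split]
  rw [← den_fold_comm]
  apply pymod_congr
  have hA := foldl_modmul_modeq modulus (fun jp => ((k : Int) ≠ jp.1))
    (fun jp => x - jp.2.1) (PySem.List.enumerate points 0) 1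
  rw [one_mul, prod_enum_ne x points k hk] at hA
  have hpre := preTable_getD x modulus points 1 k hk.le
  rw [one_mul] at hpre
  have hsuf := sufTable_getD x modulus points (k + 1) hk
  have hcast : ((k : Int) + 1) = ((k + 1 : Nat) : Int) := by push_cast; ring
  have hB : Int.ModEq modulus
      (PySem.Int.mod (PySem.List.pyGetD (preTable x modulus points 1) (k : Int) 0 *
        PySem.List.pyGetD (sufTable x modulus points) ((k : Int) + 1) 0) modulus)
      (((points.take k).map (fun p => x - p.1)).prod *
       ((points.drop (k + 1)).map (fun p => x - p.1)).prod) := by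
    rw [hcast, PySem.List.pyGetD_natCast, PySem.List.pyGetD_natCast]
    exact (pymod_modeq _ _).trans (hpre.mul hsuf)
  have hn := hA.trans hB.symm
  have h2 := (pymod_modeq ((List.foldl (fun a jp => if (k : Int) ≠ jp.1 then PySem.Int.mod (a * (x - jp.2.1)) modulus else a) 1
      (PySem.List.enumerate points 0)) *
      pyInvMod (List.foldl (fun a jp => if (k : Int) ≠ jp.1 then PySem.Int.mod (a * (points[k].1 - jp.2.1)) modulus else a) 1
        (PySem.List.enumerate points 0)) modulus) modulus).trans
    (hn.mul_right (pyInvMod (List.foldl (fun a jp => if (k : Int) ≠ jp.1 then PySem.Int.mod (a * (points[k].1 - jp.2.1)) modulus else a) 1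
        (PySem.List.enumerate points 0)) modulus))
  calc r + points[k].2 * PySem.Int.mod
        ((List.foldl (fun a jp => if (k : Int) ≠ jp.1 then PySem.Int.mod (a * (x - jp.2.1)) modulus else a) 1
          (PySem.List.enumerate points 0)) *
         pyInvMod (List.foldl (fun a jp => if (k : Int) ≠ jp.1 then PySem.Int.mod (a * (points[k].1 - jp.2.1)) modulus else a) 1
          (PySem.List.enumerate points 0)) modulus) modulus
      ≡ r + points[k].2 * (PySem.Int.mod (PySem.List.pyGetD (preTable x modulus points 1) (k : Int) 0 *
          PySem.List.pyGetD (sufTable x modulus points) ((k : Int) + 1) 0) modulus *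
          pyInvMod (List.foldl (fun a jp => if (k : Int) ≠ jp.1 then PySem.Int.mod (a * (points[k].1 - jp.2.1)) modulus else a) 1
            (PySem.List.enumerate points 0)) modulus) [ZMOD modulus] := (h2.mul_left _).add_left r
    _ = r + points[k].2 * PySem.Int.mod (PySem.List.pyGetD (preTable x modulus points 1) (k : Int) 0 *
          PySem.List.pyGetD (sufTable x modulus points) ((k : Int) + 1) 0) modulus *
          pyInvMod (List.foldl (fun a jp => if (k : Int) ≠ jp.1 then PySem.Int.mod (a * (points[k].1 - jp.2.1)) modulus else a) 1
            (PySem.List.enumerate points 0)) modulus := by ring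

-- ===== VERDICT (by name: the statement is the Claim_ definition above) =====
theorem interpolate_at_point_spec : Claim_equal_interpolate_at_point := by
  intro points x modulus _ _
  unfold Spec_interpolate_at_point
  unfold interpolate_at_point interpolate_at_point_alt
  cases points with
  | nil => simp [PySem.List.enumerate]
  | cons p rest =>
    simp only [List.length_cons, Nat.succ_ne_zero, if_neg]
    exact PySem.List.foldl_congr_mem _ _ _ 0
      (fun r ip hip => interpolate_steps_eq (p :: rest) x modulus r ip hip)
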